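-- pv_equiv track=rewrite | github.com/ArshiaRx/Computer-Science-I | labs109.py | duplicate_digit_bonus
-- ===== SOURCE A (Python) =====
-- def duplicate_digit_bonus(n):
--     #defined two variable, bonus starts at zero, count start counting at one
--     bonus, count = 0, 1
--
--     #string is a string of n
--     string = str(n)
--
--     result = string[0]     #result is the first element of num which is a string
--
--     #for every elemnt in range(1, length of num), do the following:
--     for e in range(1,len(string)):
--         #for the first element of num, increment 1 to the count
--         if result == string[e]:
--             count = count + 1    #count += 1
--
--             #if the (element + 1) is equal to the length of num do the following:
--             if (e + 1) == len(string):
--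
--                 #bonus = bonus + 2 * (10**(count - 2))
--                 bonus += 2 * (10**(count - 2))
--         else:
--             #else not, if count is equal or greater than 2, do the following:
--             if count >= 2:
--                 bonus = bonus + 10**(count - 2)
--             count = 1   #reset count to be 1
--         result = string[e]     #change the result to the num element
--
--         #return the bonus value
--     return bonus
-- ===== SOURCE B (Python) =====
-- def duplicate_digit_bonus(n):
--     # Build the run-length structure of str(n) first, then score runs in a second pass
--     # (last run's contribution is doubled, matching the task's scoring rule).
--     s = str(n)
--     runs = []
--     i = 0
--     while i < len(s):
--         j = i + 1
--         while j < len(s) and s[j] == s[i]: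
--             j += 1
--         runs.append(j - i)
--         i = j
--     bonus = 0
--     last = len(runs) - 1
--     for idx, length in enumerate(runs):
--         if length >= 2:
--             bonus += (2 if idx == last else 1) * 10 ** (length - 2)
--     return bonus
-- ===== Notes on version B (the rewrite author's own statement) =====
-- stated objective: idiomatic
-- what changed: Replaces the fused single-counter index loop (with in-loop last-position doubling) by an explicit two-phase decomposition: first group str(n) into run lengths, then score each run in a second pass, doubling the last run.
import Mathlib
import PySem

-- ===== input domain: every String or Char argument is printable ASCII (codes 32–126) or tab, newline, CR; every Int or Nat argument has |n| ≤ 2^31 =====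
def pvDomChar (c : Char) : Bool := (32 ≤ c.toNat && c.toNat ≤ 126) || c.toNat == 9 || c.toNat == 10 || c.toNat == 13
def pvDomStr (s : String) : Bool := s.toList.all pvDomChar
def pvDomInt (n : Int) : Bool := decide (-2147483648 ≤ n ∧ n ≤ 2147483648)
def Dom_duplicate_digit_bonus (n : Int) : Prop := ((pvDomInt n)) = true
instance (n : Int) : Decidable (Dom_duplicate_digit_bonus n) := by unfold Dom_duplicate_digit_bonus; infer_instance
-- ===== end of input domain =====

-- B replaces A's fused single-counter loop by an explicit run-length grouping followed by
-- a scoring pass over the runs (last run doubled); objective: more idiomatic decomposition.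

-- ===== PORT A =====
-- A's loop body over e ∈ range(1, len(string)), state (bonus, count, result)
def pvBodyA (s : List Char) (st : Int × Int × Char) (e : Int) : Int × Int × Char :=
  let c := PySem.List.pyGetD s e ' '
  if st.2.2 = c then
    let count := st.2.1 + 1
    let bonus := if e + 1 = (s.length : Int) then st.1 + 2 * 10 ^ (count - 2).toNat else st.1
    (bonus, count, c)
  else
    let bonus := if st.2.1 ≥ 2 then st.1 + 10 ^ (st.2.1 - 2).toNat else st.1
    (bonus, 1, c)

def duplicate_digit_bonus (n : Int) : Int :=
  let string := PySem.Int.toChars n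
  let result := PySem.List.pyGetD string 0 ' '
  let st := (PySem.List.pyRange 1 (string.length : Int) 1).foldl (pvBodyA string) (0, 1, result)
  st.1

-- ===== PORT B =====
-- the inner 'while j < len(s) and s[j] == s[i]' scan is the takeWhile/dropWhile split;
-- each outer-while iteration emits one run length and continues past the run
def pvRunLengths : List Char → List Int
  | [] => []
  | c :: rest =>
    ((rest.takeWhile (· == c)).length + 1 : Int) :: pvRunLengths (rest.dropWhile (· == c))
termination_by l => l.length
decreasing_by
  simpa using Nat.lt_succ_of_le (List.length_dropWhile_le (· == c) rest)

def duplicate_digit_bonus_alt (n : Int) : Int :=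
  let s := PySem.Int.toChars n
  let runs := pvRunLengths s
  let last := (runs.length : Int) - 1
  (PySem.List.enumerate runs).foldl
    (fun bonus p =>
      if p.2 ≥ 2 then bonus + (if p.1 = last then 2 else 1) * 10 ^ (p.2 - 2).toNat else bonus) 0

-- ===== PRECONDITION & SPEC =====
def Spec_duplicate_digit_bonus (n : Int) (out : Int) : Prop := out = duplicate_digit_bonus_alt n
instance (n : Int) (out : Int) : Decidable (Spec_duplicate_digit_bonus n out) := by unfold Spec_duplicate_digit_bonus; infer_instance

-- ===== CLAIM (what is proved, stated in full; the proofs are below) =====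
def Claim_equal_duplicate_digit_bonus : Prop := ∀ (n : Int), Dom_duplicate_digit_bonus n → Spec_duplicate_digit_bonus n (duplicate_digit_bonus n)

-- ===== LEMMAS AND PROOFS =====

-- recursive rendering of A's loop over the remaining characters
def pvSpecA (result : Char) (count bonus : Int) : List Char → Int
  | [] => bonus
  | c :: rest =>
    if result = c then
      pvSpecA c (count + 1)
        (if rest = [] then bonus + 2 * 10 ^ (count + 1 - 2).toNat else bonus) rest
    else
      pvSpecA c 1 (if count ≥ 2 then bonus + 10 ^ (count - 2).toNat else bonus) rest

-- recursive scoring of a run-length list, last run doubled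
def pvScore : List Int → Int
  | [] => 0
  | [L] => if L ≥ 2 then 2 * 10 ^ (L - 2).toNat else 0
  | L :: L' :: rest => (if L ≥ 2 then 10 ^ (L - 2).toNat else 0) + pvScore (L' :: rest)

theorem pvLoopA (s : List Char) :
    ∀ (m k : Nat), m = s.length - k → k ≤ s.length →
    ∀ (bonus count : Int) (result : Char),
      ((PySem.List.pyRange (k : Int) (s.length : Int) 1).foldl (pvBodyA s) (bonus, count, result)).1
        = pvSpecA result count bonus (s.drop k) := by
  intro m
  induction m with
  | zero =>
    intro k hm hk bonus count result
    have hk' : k = s.length := by omega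
    subst hk'
    rw [PySem.List.pyRange_one_eq_nil (le_refl _)]
    simp [pvSpecA]
  | succ m ih =>
    intro k hm hk bonus count result
    have hlt : k < s.length := by omega
    have hlt' : (k : Int) < (s.length : Int) := by exact_mod_cast hlt
    rw [PySem.List.pyRange_one_cons hlt', List.foldl_cons,
        List.drop_eq_getElem_cons hlt]
    have hget : PySem.List.pyGetD s (k : Int) ' ' = s[k] := by
      rw [PySem.List.pyGetD_natCast, List.getD_eq_getElem _ _ hlt]
    have hcast : (k : Int) + 1 = ((k + 1 : Nat) : Int) := by push_cast; ring
    have hend : ((k : Int) + 1 = (s.length : Int)) ↔ (s.drop (k + 1) = []) := by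
      rw [List.drop_eq_nil_iff]
      constructor <;> intro h <;> [omega; exact_mod_cast (by omega : ((k+1:Nat):Int) = (s.length:Int))]
    simp only [pvBodyA, pvSpecA, hget]
    by_cases hr : result = s[k]
    · by_cases he : s.drop (k + 1) = []
      · rw [hcast, ih (k+1) (by omega) (by omega)]
        simp [hr, hend, he]
      · rw [hcast, ih (k+1) (by omega) (by omega)]
        simp [hr, hend, he]
    · rw [hcast, ih (k+1) (by omega) (by omega)]
      simp [hr]

theorem pvRunLengths_nil : pvRunLengths [] = [] := by rw [pvRunLengths]

theorem pvRunLengths_cons (c : Char) (rest : List Char) :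
    pvRunLengths (c :: rest)
      = ((rest.takeWhile (· == c)).length + 1 : Int) :: pvRunLengths (rest.dropWhile (· == c)) := by
  rw [pvRunLengths]

theorem pvMainA (t : List Char) : ∀ (r : Char) (count bonus : Int), 1 ≤ count →
    pvSpecA r count bonus t =
      bonus + (if t = [] then 0
        else pvScore ((count + (t.takeWhile (· == r)).length) :: pvRunLengths (t.dropWhile (· == r)))) := by
  induction t with
  | nil => intro r count bonus _; simp [pvSpecA]
  | cons c rest ih =>
    intro r count bonus hc
    simp only [pvSpecA]
    by_cases hrc : r = c
    · subst hrc
      rw [if_pos rfl, List.takeWhile_cons_of_pos (by simp), List.dropWhile_cons_of_pos (by simp),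
          if_neg (by simp : ¬(r :: rest = []))]
      cases rest with
      | nil =>
        have h2 : count + 1 ≥ 2 := by omega
        simp [pvSpecA, pvRunLengths_nil, pvScore, h2]
      | cons d rest' =>
        rw [if_neg (by simp), ih r (count + 1) bonus (by omega), if_neg (by simp)]
        simp only [List.length_cons]
        push_cast
        ring_nf
    · have hb : ¬((c == r) = true) := by
        simp only [beq_iff_eq]
        exact fun h => hrc h.symm
      rw [if_neg hrc, List.takeWhile_cons_of_neg (p := fun x => x == r) (l := rest) hb,
          List.dropWhile_cons_of_neg (p := fun x => x == r) (l := rest) hb,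
          if_neg (by simp : ¬(c :: rest = []))]
      cases rest with
      | nil =>
        simp only [pvSpecA, pvRunLengths_cons, List.takeWhile_nil, List.dropWhile_nil,
          List.length_nil, pvRunLengths_nil, pvScore, List.length_nil]
        simp only [Nat.cast_zero, add_zero, zero_add]
        split_ifs <;> omega
      | cons d rest' =>
        rw [ih c 1 _ (by omega), if_neg (show ¬(d :: rest' = []) by simp), pvRunLengths_cons]
        simp only [pvScore, List.length_nil, Nat.cast_zero, add_zero]
        have h1 : (1 : Int) + (((d :: rest').takeWhile (· == c)).length : Int)
            = (((d :: rest').takeWhile (· == c)).length : Int) + 1 := by ring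
        rw [h1]
        split_ifs <;> ring

theorem pvFoldB (runs : List Int) :
    ∀ (s0 last acc : Int), last = s0 + runs.length - 1 →
      (PySem.List.enumerate runs s0).foldl
        (fun bonus p =>
          if p.2 ≥ 2 then bonus + (if p.1 = last then 2 else 1) * 10 ^ (p.2 - 2).toNat else bonus) acc
        = acc + pvScore runs := by
  induction runs with
  | nil => intro s0 last acc _; simp [pvScore, PySem.List.enumerate]
  | cons L rest ih =>
    intro s0 last acc hlast
    rw [PySem.List.enumerate_cons, List.foldl_cons]
    cases rest with
    | nil =>
      have h0 : s0 = last := by simp at hlast; omega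
      simp only [PySem.List.enumerate, List.foldl_nil, pvScore, h0]
      split_ifs <;> ring
    | cons L' rest' =>
      have hne : s0 ≠ last := by
        simp only [List.length_cons] at hlast; push_cast at hlast; omega
      rw [ih (s0 + 1) last _ (by simp at hlast ⊢; omega)]
      simp only [pvScore, if_neg hne]
      split_ifs <;> ring

-- ===== VERDICT (by name: the statement is the Claim_ definition above) =====
theorem duplicate_digit_bonus_spec : Claim_equal_duplicate_digit_bonus := by
  intro n _
  unfold Spec_duplicate_digit_bonus duplicate_digit_bonus duplicate_digit_bonus_alt
  cases hs : PySem.Int.toChars n with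
  | nil =>
    dsimp only
    rw [show ((List.length ([] : List Char) : Int)) = 0 from rfl,
        PySem.List.pyRange_one_eq_nil (by norm_num)]
    simp [pvRunLengths]
  | cons r t =>
    dsimp only
    rw [pvFoldB (pvRunLengths (r :: t)) 0 _ 0 (by ring), zero_add]
    have hA := pvLoopA (r :: t) ((r :: t).length - 1) 1 rfl (by simp) 0 1 r
    rw [Nat.cast_one] at hA
    rw [PySem.List.pyGetD_zero_cons, hA, List.drop_one, List.tail_cons,
        pvMainA t r 1 0 (by omega), zero_add]
    cases t with
    | nil => simp [pvRunLengths, pvScore]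
    | cons d t' =>
      rw [if_neg (by simp)]
      simp only [pvRunLengths, List.takeWhile_cons, List.dropWhile_cons]
      rw [show ((1:Int) + ((if d == r then d :: List.takeWhile (· == r) t' else []).length : Int))
          = (((if d == r then d :: List.takeWhile (· == r) t' else []).length : Int) + 1) from by ring]
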